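-- pv_equiv track=rewrite | github.com/mdwoicke/Coding-Devon | devon/swebenchenv/environment/unified_diff/utils.py | match_fence
-- ===== SOURCE A (Python) =====
-- def match_fence(lines, fence):
--     subset_length = len(fence)
--
--     if subset_length > 0:
--         for i in range(len(lines) - subset_length + 1):
--             match = [line[1] for line in lines[i:i+subset_length]]
--             if match == fence:
--                 return lines[i][0], lines[i+subset_length-1][0]
--
--     return None, None
-- ===== SOURCE B (Python) =====
-- def match_fence(lines, fence):
--     if not fence:
--         return None, None
--     texts = [line[1] for line in lines]
--     # Staged candidate refinement: start with every position where the whole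
--     # window fits, then for each fence element j keep only the candidates
--     # whose j-th column matches; the surviving first candidate is the match.
--     # No window is ever extracted and no per-candidate verification loop runs.
--     cands = list(range(len(lines) - len(fence) + 1))
--     for j, s in enumerate(fence):
--         cands = [i for i in cands if texts[i + j] == s]
--         if not cands:
--             return None, None
--     return lines[cands[0]][0], lines[cands[0] + len(fence) - 1][0]
-- ===== Notes on version B (the rewrite author's own statement) =====
-- stated objective: alternative
-- what changed: B replaces A's sliding-window slice-and-compare scan with staged candidate-set refinement: it starts from all feasible start positions and, column by column over the fence, filters the candidate list (with an early exit when it empties), taking the first surviving candidate; no window is ever sliced and no per-start comparison loop runs.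
import Mathlib
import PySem

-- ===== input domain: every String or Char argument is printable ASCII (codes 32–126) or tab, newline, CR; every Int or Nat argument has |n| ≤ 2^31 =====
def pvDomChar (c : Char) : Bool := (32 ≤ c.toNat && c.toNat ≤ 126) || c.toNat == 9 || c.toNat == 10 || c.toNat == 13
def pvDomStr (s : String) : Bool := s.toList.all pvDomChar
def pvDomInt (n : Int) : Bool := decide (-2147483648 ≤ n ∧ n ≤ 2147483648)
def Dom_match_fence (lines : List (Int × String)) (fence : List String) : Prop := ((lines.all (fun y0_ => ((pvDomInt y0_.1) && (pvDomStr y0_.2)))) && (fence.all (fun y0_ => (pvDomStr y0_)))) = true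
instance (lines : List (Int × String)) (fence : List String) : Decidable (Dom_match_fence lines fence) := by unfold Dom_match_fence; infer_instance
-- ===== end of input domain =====

-- B replaces A's sliding-window slice-and-compare scan with staged candidate-set
-- refinement over the fence columns, with an early exit when the candidate set
-- empties (objective: alternative; same worst-case cost).

-- ===== PORT A =====
-- the for-loop over range(len(lines) - subset_length + 1) with early return
def aLoop (lines : List (Int × String)) (fence : List String) : List Int → Option Int × Option Int
  | [] => (none, none)
  | i :: is =>
    -- match = [line[1] for line in lines[i:i+subset_length]]
    let mtch := (PySem.List.slice lines (some i) (some (i + (fence.length : Int)))).map (fun l => l.2)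
    if mtch = fence then
      ((PySem.List.pyGet? lines i).map (fun l => l.1),
       (PySem.List.pyGet? lines (i + (fence.length : Int) - 1)).map (fun l => l.1))
    else aLoop lines fence is

def match_fence (lines : List (Int × String)) (fence : List String) : Option Int × Option Int :=
  if 0 < fence.length then
    aLoop lines fence (PySem.List.pyRange 0 ((lines.length : Int) - (fence.length : Int) + 1) 1)
  else (none, none)

-- ===== PORT B =====
-- one loop iteration: cands = [i for i in cands if texts[i + j] == s]
def bStage (texts : List String) (j : Int) (s : String) (cands : List Int) : List Int :=
  cands.filter (fun i => PySem.List.pyGet? texts (i + j) == some s)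

-- the for-loop over enumerate(fence) with its early return, then the final indexing
def bLoop (lines : List (Int × String)) (texts : List String) (m : Int) :
    List (Int × String) → List Int → Option Int × Option Int
  | [], cands =>
      ((PySem.List.pyGet? cands 0).bind (fun c => (PySem.List.pyGet? lines c).map (fun l => l.1)),
       (PySem.List.pyGet? cands 0).bind (fun c => (PySem.List.pyGet? lines (c + m - 1)).map (fun l => l.1)))
  | (j, s) :: rest, cands =>
      let cands' := bStage texts j s cands
      if cands' = [] then (none, none) else bLoop lines texts m rest cands'

def match_fence_alt (lines : List (Int × String)) (fence : List String) : Option Int × Option Int :=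
  match fence with
  | [] => (none, none)
  | _ =>
    let texts := lines.map (fun l => l.2)
    bLoop lines texts (fence.length : Int) (PySem.List.enumerate fence 0)
      (PySem.List.pyRange 0 ((lines.length : Int) - (fence.length : Int) + 1) 1)

-- ===== PRECONDITION & SPEC =====
def Spec_match_fence (lines : List (Int × String)) (fence : List String) (out : Option Int × Option Int) : Prop := out = match_fence_alt lines fence
instance (lines : List (Int × String)) (fence : List String) (out : Option Int × Option Int) : Decidable (Spec_match_fence lines fence out) := by unfold Spec_match_fence; infer_instance

-- ===== CLAIM (what is proved, stated in full; the proofs are below) =====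
def Claim_equal_match_fence : Prop := ∀ (lines : List (Int × String)) (fence : List String), Dom_match_fence lines fence → Spec_match_fence lines fence (match_fence lines fence)

-- ===== LEMMAS AND PROOFS =====

-- the value both programs return for a matching start c
def pvOut (lines : List (Int × String)) (m : Int) (c : Int) : Option Int × Option Int :=
  ((PySem.List.pyGet? lines c).map (fun l => l.1),
   (PySem.List.pyGet? lines (c + m - 1)).map (fun l => l.1))

-- the value determined by the first element of a candidate list
def pvFirst (lines : List (Int × String)) (m : Int) : List Int → Option Int × Option Int
  | [] => (none, none)
  | c :: _ => pvOut lines m c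

-- the candidate set after k refinement stages
def Ck (lines : List (Int × String)) (fence : List String) (k : Nat) : List Int :=
  (PySem.List.pyRange 0 ((lines.length : Int) - (fence.length : Int) + 1) 1).filter
    (fun i => (fence.take k).isPrefixOf ((lines.map (fun l => l.2)).drop i.toNat))

-- the window comparison in A equals the prefix test on the text list
theorem window_eq_prefix (lines : List (Int × String)) (head : String) (tl : List String) (i : Nat) :
    ((PySem.List.slice lines (some (i : Int)) (some ((i : Int) + (((head :: tl).length : Nat) : Int)))).map (fun l => l.2) = head :: tl)
      ↔ (head :: tl).isPrefixOf ((lines.map (fun l => l.2)).drop i) := by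
  rw [show ((((head :: tl).length : Nat)) : Int) = (((tl.length + 1 : Nat)) : Int) from by simp,
    PySem.List.slice_natCast_add]
  rw [List.isPrefixOf_iff_prefix, List.prefix_iff_eq_take]
  have hsw : List.take (head :: tl).length (List.drop i (lines.map (fun l => l.2)))
      = List.map (fun l => l.2) (List.take (tl.length + 1) (List.drop i lines)) := by
    simp
  rw [hsw]
  exact eq_comm

-- A's loop returns the first element of the fully filtered start list
theorem aLoop_filter (lines : List (Int × String)) (head : String) (tl : List String) :
    ∀ (is : List Int), (∀ i ∈ is, 0 ≤ i) →
    aLoop lines (head :: tl) is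
      = pvFirst lines (((head :: tl).length : Nat) : Int)
          (is.filter (fun i => (head :: tl).isPrefixOf ((lines.map (fun l => l.2)).drop i.toNat))) := by
  intro is
  induction is with
  | nil => intro _; rfl
  | cons i is' ih =>
    intro hmem
    obtain ⟨a, rfl⟩ : ∃ a : Nat, i = (a : Int) :=
      ⟨i.toNat, (Int.toNat_of_nonneg (hmem i (by simp))).symm⟩
    have hw := window_eq_prefix lines head tl a
    rw [List.filter_cons]
    simp only [Int.toNat_natCast]
    by_cases hp : (head :: tl).isPrefixOf ((lines.map (fun l => l.2)).drop a) = true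
    · rw [if_pos (by simpa using hp)]
      simp only [aLoop, if_pos (hw.mpr hp)]
      rfl
    · rw [if_neg (by simpa using hp)]
      have hm : ¬ ((PySem.List.slice lines (some ((a : Nat) : Int)) (some (((a : Nat) : Int) + (((head :: tl).length : Nat) : Int)))).map (fun l => l.2) = head :: tl) := by
        intro hc; exact hp (hw.mp hc)
      simp only [aLoop, if_neg hm]
      exact ih (fun j hj => hmem j (by simp [hj]))

-- (xs ++ [x]).isPrefixOf l checks xs then the element at position xs.length
theorem concat_isPrefixOf (x : String) : ∀ (xs l : List String),
    (xs ++ [x]).isPrefixOf l = (xs.isPrefixOf l && (l[xs.length]? == some x))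
  | [], [] => by simp [List.isPrefixOf]
  | [], y :: l => by
    show (x == y && List.isPrefixOf [] l) = (List.isPrefixOf [] (y :: l) && ((y :: l)[0]? == some x))
    simp only [List.isPrefixOf, List.getElem?_cons_zero, Bool.and_true, Bool.true_and]
    rw [show ((some y == some x : Bool)) = (y == x) from by simp]
    exact BEq.comm
  | z :: zs, [] => by simp [List.isPrefixOf]
  | z :: zs, w :: ws => by
    simp only [List.cons_append, List.isPrefixOf, List.length_cons, List.getElem?_cons_succ]
    rw [concat_isPrefixOf x zs ws, Bool.and_assoc]

-- extending the matched prefix by one fence element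
theorem take_succ_prefix (p l : List String) (k : Nat) (hk : k < p.length) :
    (p.take (k + 1)).isPrefixOf l = ((p.take k).isPrefixOf l && (l[k]? == some p[k])) := by
  rw [List.take_add_one, List.getElem?_eq_getElem hk]
  have hlen : (p.take k).length = k := by simp; omega
  simp only [Option.toList_some]
  rw [concat_isPrefixOf p[k] (p.take k) l, hlen]

-- one refinement stage moves Ck to Ck+1
theorem bStage_Ck (lines : List (Int × String)) (fence : List String) (k : Nat) (hk : k < fence.length) :
    bStage (lines.map (fun l => l.2)) (k : Int) fence[k] (Ck lines fence k) = Ck lines fence (k + 1) := by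
  unfold bStage Ck
  rw [List.filter_filter]
  apply List.filter_congr
  intro i hi
  have h0 : (0 : Int) ≤ i := (PySem.List.mem_pyRange_one.mp hi).1
  obtain ⟨a, rfl⟩ : ∃ a : Nat, i = (a : Int) := ⟨i.toNat, (Int.toNat_of_nonneg h0).symm⟩
  simp only [Int.toNat_natCast]
  rw [take_succ_prefix fence (List.drop a (lines.map (fun l => l.2))) k hk]
  rw [List.getElem?_drop]
  rw [show ((a : Int) + (k : Int)) = (((a + k : Nat)) : Int) from by push_cast; ring,
    PySem.List.pyGet?_natCast]
  rw [Bool.and_comm]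

-- once the candidate set is empty it stays empty
theorem Ck_nil_mono (lines : List (Int × String)) (fence : List String) (k k' : Nat)
    (hkk : k ≤ k') (h : Ck lines fence k = []) : Ck lines fence k' = [] := by
  rw [List.eq_nil_iff_forall_not_mem]
  intro i hi
  have hmem := List.mem_filter.mp hi
  have hpre : (fence.take k).isPrefixOf ((lines.map (fun l => l.2)).drop i.toNat) = true := by
    have htr : fence.take k <+: fence.take k' := by
      have h1 : (fence.take k').take k = fence.take k := by
        rw [List.take_take, Nat.min_eq_left hkk]
      rw [← h1]
      exact List.take_prefix k (fence.take k')
    rw [List.isPrefixOf_iff_prefix] at hmem ⊢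
    exact htr.trans hmem.2
  have : i ∈ Ck lines fence k := List.mem_filter.mpr ⟨hmem.1, hpre⟩
  rw [h] at this
  exact (List.not_mem_nil).elim this

-- bLoop over the remaining fence suffix computes the first fully matching start
theorem bLoop_inv (lines : List (Int × String)) (fence : List String) :
    ∀ (suf : List String) (k : Nat), fence.drop k = suf →
    bLoop lines (lines.map (fun l => l.2)) ((fence.length : Nat) : Int) (PySem.List.enumerate suf (k : Int)) (Ck lines fence k)
      = pvFirst lines ((fence.length : Nat) : Int) (Ck lines fence fence.length) := by
  intro suf
  induction suf with
  | nil =>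
    intro k hdrop
    have hk : fence.length ≤ k := List.drop_eq_nil_iff.mp hdrop
    have hCk : Ck lines fence k = Ck lines fence fence.length := by
      unfold Ck
      rw [List.take_of_length_le hk, List.take_length]
    rw [hCk]
    show bLoop _ _ _ (PySem.List.enumerate [] _) _ = _
    rw [PySem.List.enumerate_nil]
    cases hc : Ck lines fence fence.length with
    | nil => simp [bLoop, pvFirst, PySem.List.pyGet?]
    | cons c cs =>
      simp [bLoop, pvFirst, pvOut, PySem.List.pyGet?, PySem.List.pyIdx?]
  | cons s rest ih =>
    intro k hdrop
    have hk : k < fence.length := by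
      rcases Nat.lt_or_ge k fence.length with h | h
      · exact h
      · rw [List.drop_eq_nil_of_le h] at hdrop
        cases hdrop
    have hs : fence[k] = s := by
      have := congrArg (fun l => l[0]?) hdrop
      simp only [List.getElem?_drop, Nat.add_zero, List.getElem?_cons_zero] at this
      rw [List.getElem?_eq_getElem hk] at this
      exact Option.some_injective _ this
    have hdrop' : fence.drop (k + 1) = rest := by
      have := congrArg List.tail hdrop
      simpa [List.tail_drop] using this
    rw [PySem.List.enumerate_cons]
    show (let cands' := bStage _ (k : Int) s (Ck lines fence k);
          if cands' = [] then (none, none) else bLoop _ _ _ (PySem.List.enumerate rest ((k : Int) + 1)) cands') = _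
    rw [show bStage (lines.map (fun l => l.2)) (k : Int) s (Ck lines fence k) = Ck lines fence (k + 1) from hs ▸ bStage_Ck lines fence k hk]
    by_cases hnil : Ck lines fence (k + 1) = []
    · rw [if_pos hnil]
      rw [Ck_nil_mono lines fence (k + 1) fence.length hk hnil]
      rfl
    · rw [if_neg hnil]
      rw [show ((k : Int) + 1) = (((k + 1 : Nat)) : Int) from by push_cast; ring]
      exact ih (k + 1) hdrop'

-- ===== VERDICT (by name: the statement is the Claim_ definition above) =====
theorem match_fence_spec : Claim_equal_match_fence := by
  intro lines fence _
  unfold Spec_match_fence match_fence match_fence_alt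
  cases fence with
  | nil => simp
  | cons head tl =>
    rw [if_pos (by simp : 0 < (head :: tl).length)]
    have hbase : ∀ i ∈ PySem.List.pyRange 0 ((lines.length : Int) - (((head :: tl).length : Nat) : Int) + 1) 1, 0 ≤ i := by
      intro i hi
      exact (PySem.List.mem_pyRange_one.mp hi).1
    rw [show ((head :: tl).length : Int) = (((head :: tl).length : Nat) : Int) from rfl]
    rw [aLoop_filter lines head tl _ hbase]
    have hB := bLoop_inv lines (head :: tl) (head :: tl) 0 rfl
    have hC0 : Ck lines (head :: tl) 0
        = PySem.List.pyRange 0 ((lines.length : Int) - (((head :: tl).length : Nat) : Int) + 1) 1 := by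
      unfold Ck
      simp
    have hClen : Ck lines (head :: tl) (head :: tl).length
        = (PySem.List.pyRange 0 ((lines.length : Int) - (((head :: tl).length : Nat) : Int) + 1) 1).filter
            (fun i => (head :: tl).isPrefixOf ((lines.map (fun l => l.2)).drop i.toNat)) := by
      unfold Ck
      rw [List.take_length]
    rw [hC0] at hB
    rw [hClen] at hB
    simp only [Nat.cast_zero] at hB
    rw [hB]
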